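-- pv_equiv track=rewrite | github.com/VictorThompsonKeyl/TestTP1GPO | efficacite-4.py | erase
-- ===== SOURCE A (Python) =====
-- def erase(cc):
--     res = ""
--     i = 0
--     while i < len(cc):
--         if cc[i] == " ":
--             j = 1
--             while i+j < len(cc) and cc[i+j] == " ":
--                 j += 1
--             if j > 1:
--                 res += " "*(j)
--                 i += j-1
--         else:
--             res += cc[i]
--         i += 1
--     return res
-- ===== SOURCE B (Python) =====
-- def erase(cc):
--     out = []
--     run = 0
--     for ch in cc:
--         if ch == ' ':
--             run += 1
--         else:
--             if run != 1:
--                 out.append(' ' * run)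
--             run = 0
--             out.append(ch)
--     if run != 1:
--         out.append(' ' * run)
--     return ''.join(out)
-- ===== Notes on version B (the rewrite author's own statement) =====
-- stated objective: simpler
-- what changed: Replaced A's index-based while loop with a nested run-length rescan and quadratic string += accumulation by a single for-pass keeping a pending-space counter, flushing it (unless it equals 1) at each non-space character and at the end, joining the pieces once.
import Mathlib
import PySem

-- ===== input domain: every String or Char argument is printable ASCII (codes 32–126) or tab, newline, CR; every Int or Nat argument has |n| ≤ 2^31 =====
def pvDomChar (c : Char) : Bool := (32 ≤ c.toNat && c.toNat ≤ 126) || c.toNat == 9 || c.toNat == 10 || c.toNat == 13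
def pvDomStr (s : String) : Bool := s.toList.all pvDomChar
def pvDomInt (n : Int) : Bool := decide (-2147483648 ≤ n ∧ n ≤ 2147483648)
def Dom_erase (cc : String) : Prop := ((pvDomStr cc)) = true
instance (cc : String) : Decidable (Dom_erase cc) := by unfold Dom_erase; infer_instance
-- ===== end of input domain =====

-- B replaces A's index-driven while loop with nested run-rescan by a single pass over the characters keeping a pending-space counter; objective: simpler.


-- ===== PORT A =====
def eraseInner (l : List Char) (i j : Nat) : Nat :=
  if i + j < l.length ∧ l[i+j]? = some ' ' then eraseInner l i (j+1) else j
termination_by l.length - (i + j)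
decreasing_by omega

theorem eraseInner_ge (l : List Char) (i j : Nat) : j ≤ eraseInner l i j := by
  unfold eraseInner
  split
  · exact le_trans (Nat.le_succ j) (eraseInner_ge l i (j+1))
  · exact le_refl j
termination_by l.length - (i + j)
decreasing_by omega

def eraseLoop (l : List Char) (i : Nat) (res : List Char) : List Char :=
  if h : i < l.length then
    if l[i]? = some ' ' then
      let j := eraseInner l i 1
      if j > 1 then eraseLoop l (i + j) (res ++ List.replicate j ' ')
      else eraseLoop l (i + 1) res
    else eraseLoop l (i + 1) (res ++ [l[i]])
  else res
termination_by l.length - i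
decreasing_by all_goals (have := eraseInner_ge l i 1; omega)

def erase (cc : String) : String := String.ofList (eraseLoop cc.toList 0 [])

-- ===== PORT B =====
-- single pass: run = number of pending spaces, flushed (unless exactly 1) at each non-space character and at the end
def altLoop : List Char → Nat → List Char → List Char
  | [], run, out => if run ≠ 1 then out ++ List.replicate run ' ' else out
  | ch :: rest, run, out =>
      if ch = ' ' then altLoop rest (run + 1) out
      else altLoop rest 0 ((if run ≠ 1 then out ++ List.replicate run ' ' else out) ++ [ch])

def erase_alt (cc : String) : String := String.ofList (altLoop cc.toList 0 [])

-- ===== PRECONDITION & SPEC =====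
def Spec_erase (cc : String) (out : String) : Prop := out = erase_alt cc
instance (cc : String) (out : String) : Decidable (Spec_erase cc out) := by unfold Spec_erase; infer_instance

-- ===== CLAIM (what is proved, stated in full; the proofs are below) =====
def Claim_equal_erase : Prop := ∀ (cc : String), Dom_erase cc → Spec_erase cc (erase cc)

-- ===== LEMMAS AND PROOFS =====
def countSp : List Char → Nat
  | [] => 0
  | c :: t => if c = ' ' then countSp t + 1 else 0

theorem eraseInner_eq (l : List Char) (i j : Nat) :
    eraseInner l i j = j + countSp (l.drop (i + j)) := by
  unfold eraseInner
  split
  · rename_i h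
    obtain ⟨hlt, hsp⟩ := h
    have hdrop : l.drop (i + j) = ' ' :: l.drop (i + j + 1) := by
      rw [List.drop_eq_getElem_cons hlt]
      have : l[i+j] = ' ' := by
        rw [List.getElem?_eq_getElem hlt] at hsp
        simpa using hsp
      rw [this]
    rw [eraseInner_eq l i (j+1), hdrop]
    have : i + (j + 1) = i + j + 1 := by omega
    rw [this]
    simp [countSp]
    omega
  · rename_i h
    have hget : l[i+j]? = (l.drop (i+j)).head? := by
      rw [List.head?_eq_getElem?, List.getElem?_drop]
      simp
    have : countSp (l.drop (i + j)) = 0 := by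
      cases hd : l.drop (i + j) with
      | nil => simp [countSp]
      | cons c t =>
        simp only [countSp]
        by_cases hc : c = ' '
        · exfalso
          apply h
          constructor
          · have hlen : (l.drop (i+j)).length = l.length - (i+j) := by simp
            rw [hd] at hlen; simp at hlen; omega
          · rw [hget, hd, hc]; rfl
        · simp [hc]
    omega
termination_by l.length - (i + j)
decreasing_by omega

theorem countSp_decomp (l : List Char) :
    l = List.replicate (countSp l) ' ' ++ l.drop (countSp l) := by
  induction l with
  | nil => rfl
  | cons c t ih =>
    by_cases h : c = ' '
    · subst h
      simp only [countSp, if_true, List.replicate_succ, List.cons_append, List.drop_succ_cons]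
      exact congrArg _ ih
    · simp [countSp, h]

theorem countSp_drop_head (l : List Char) :
    (l.drop (countSp l)).head? ≠ some ' ' := by
  induction l with
  | nil => simp
  | cons c t ih =>
    by_cases h : c = ' '
    · simpa [countSp, h] using ih
    · simp [countSp, h]

def eraseGo : List Char → List Char → List Char
  | [], res => res
  | c :: rest, res =>
      if c = ' ' then
        let k := countSp rest
        if 1 ≤ k then eraseGo (rest.drop k) (res ++ List.replicate (k+1) ' ')
        else eraseGo rest res
      else eraseGo rest (res ++ [c])
termination_by l => l.length
decreasing_by all_goals simp

theorem eraseLoop_eq_go (l : List Char) (i : Nat) (res : List Char) :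
    eraseLoop l i res = eraseGo (l.drop i) res := by
  unfold eraseLoop
  split
  · rename_i hlt
    have hdrop : l.drop i = l[i] :: l.drop (i+1) := List.drop_eq_getElem_cons hlt
    have hget : l[i]? = some l[i] := List.getElem?_eq_getElem hlt
    rw [hdrop]
    by_cases hsp : l[i] = ' '
    · have hj : eraseInner l i 1 = 1 + countSp (l.drop (i+1)) := eraseInner_eq l i 1
      rw [hsp]
      simp only [eraseGo, if_true]
      rw [if_pos (show l[i]? = some ' ' by rw [hget, hsp])]
      by_cases hk : 1 ≤ countSp (l.drop (i+1))
      · rw [if_pos hk, if_pos (show eraseInner l i 1 > 1 by omega)]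
        rw [eraseLoop_eq_go l (i + eraseInner l i 1), hj]
        congr 1
        · rw [List.drop_drop]
          congr 1
          omega
        · congr 2
          omega
      · rw [if_neg hk, if_neg (show ¬ eraseInner l i 1 > 1 by omega)]
        exact eraseLoop_eq_go l (i+1) res
    · rw [if_neg (show ¬ l[i]? = some ' ' by rw [hget]; intro hc; exact hsp (by simpa using hc))]
      rw [eraseLoop_eq_go l (i+1)]
      simp only [eraseGo]
      rw [if_neg hsp]
  · rename_i hge
    have h0 : l.drop i = [] := List.drop_eq_nil_of_le (by omega)
    rw [h0]
    simp [eraseGo]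
termination_by l.length - i
decreasing_by all_goals (have := eraseInner_ge l i 1; omega)
theorem altLoop_spaces (k : Nat) (t : List Char) (run : Nat) (out : List Char) :
    altLoop (List.replicate k ' ' ++ t) run out = altLoop t (run + k) out := by
  induction k generalizing run with
  | zero => simp
  | succ n ih =>
    rw [List.replicate_succ]
    simp only [List.cons_append, altLoop, if_true]
    rw [ih]
    have : run + 1 + n = run + (n + 1) := by omega
    rw [this]

theorem altLoop_flush (t : List Char) (r : Nat) (out : List Char)
    (h : t.head? ≠ some ' ') :
    altLoop t r out = altLoop t 0 (if r ≠ 1 then out ++ List.replicate r ' ' else out) := by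
  cases t with
  | nil => simp [altLoop]
  | cons c rest =>
    have hc : ¬ c = ' ' := by intro hc; subst hc; exact h rfl
    simp [altLoop, hc]

theorem eraseGo_eq_alt (l : List Char) (out : List Char) :
    eraseGo l out = altLoop l 0 out := by
  cases l with
  | nil => simp [eraseGo, altLoop]
  | cons c rest =>
    by_cases hc : c = ' '
    · subst hc
      have hdec : rest = List.replicate (countSp rest) ' ' ++ rest.drop (countSp rest) :=
        countSp_decomp rest
      have hhead : (rest.drop (countSp rest)).head? ≠ some ' ' := countSp_drop_head rest
      have halt : altLoop (' ' :: rest) 0 out = altLoop (rest.drop (countSp rest)) (countSp rest + 1) out := by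
        conv_lhs => rw [show (' ' :: rest) = List.replicate (countSp rest + 1) ' ' ++ rest.drop (countSp rest) by
          rw [List.replicate_succ, List.cons_append]; exact congrArg _ hdec]
        rw [altLoop_spaces]
        have : 0 + (countSp rest + 1) = countSp rest + 1 := by omega
        rw [this]
      by_cases h1 : 1 ≤ countSp rest
      · have hg : eraseGo (' ' :: rest) out
            = eraseGo (rest.drop (countSp rest)) (out ++ List.replicate (countSp rest + 1) ' ') := by
          simp only [eraseGo, if_true, if_pos h1]
        rw [hg, halt, altLoop_flush _ _ _ hhead,
            eraseGo_eq_alt (rest.drop (countSp rest))]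
        rw [if_pos (show countSp rest + 1 ≠ 1 by omega)]
      · have hk0 : countSp rest = 0 := by omega
        have hg : eraseGo (' ' :: rest) out = eraseGo rest out := by
          simp only [eraseGo, if_true, if_neg h1]
        rw [hg, halt, hk0]
        simp only [List.drop_zero]
        have hhead' : rest.head? ≠ some ' ' := by
          rw [hk0] at hhead; simpa using hhead
        rw [altLoop_flush _ _ _ hhead']
        rw [eraseGo_eq_alt rest]
        simp
    · have hg : eraseGo (c :: rest) out = eraseGo rest (out ++ [c]) := by
        simp only [eraseGo]; rw [if_neg hc]
      rw [hg, eraseGo_eq_alt rest]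
      simp [altLoop, hc]
termination_by l.length
decreasing_by all_goals simp

-- ===== VERDICT (by name: the statement is the Claim_ definition above) =====
theorem erase_spec : Claim_equal_erase := by
  intro cc _
  unfold Spec_erase erase erase_alt
  rw [eraseLoop_eq_go, List.drop_zero, eraseGo_eq_alt]
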